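-- pv_equiv track=rewrite | github.com/RupamGanguly46/Guruji_Git | Sem2/nested_list.py | minfind
-- ===== SOURCE A (Python) =====
-- def minfind(n,ls):
--     for i in range(n-1):
--         a=min(ls)
--         while True:
--             if a in ls:
--                 ls.remove(a)
--             else:
--                 break
--     return min(ls)
-- ===== SOURCE B (Python) =====
-- def minfind(n, ls):
--     vals = sorted(set(ls))
--     return vals[max(n - 1, 0)]
-- ===== Notes on version B (the rewrite author's own statement) =====
-- stated objective: faster
-- what changed: Replaces the n-1 rounds of min-scan-then-remove-all with one sort of the distinct values followed by direct indexing at max(n-1,0).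
import Mathlib
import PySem

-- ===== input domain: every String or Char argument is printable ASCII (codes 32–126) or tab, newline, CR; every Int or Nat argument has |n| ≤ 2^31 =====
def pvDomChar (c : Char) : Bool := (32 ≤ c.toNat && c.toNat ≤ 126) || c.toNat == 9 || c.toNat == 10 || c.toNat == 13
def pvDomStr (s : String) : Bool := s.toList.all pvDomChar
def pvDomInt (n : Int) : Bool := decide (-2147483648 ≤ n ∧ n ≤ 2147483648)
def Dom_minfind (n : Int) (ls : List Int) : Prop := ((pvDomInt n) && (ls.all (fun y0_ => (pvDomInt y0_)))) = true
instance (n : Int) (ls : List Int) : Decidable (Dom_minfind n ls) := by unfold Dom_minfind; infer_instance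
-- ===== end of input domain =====

-- B replaces A's n-1 rounds of min-scan-then-remove-all with sorting the distinct values once and
-- indexing; equivalence is about the RETURN value only (A empties ls of its n-1 smallest values in
-- place, B does not mutate ls).

-- ===== PORT A =====
-- 'while True: if a in ls: ls.remove(a) else: break' — removes every occurrence of a
def removeLoop (a : Int) (ls : List Int) : List Int :=
  if h : a ∈ ls then removeLoop a ((PySem.List.remove? ls a).getD ls) else ls
termination_by ls.length
decreasing_by
  rw [PySem.List.remove?_eq_some_erase ls a h, Option.getD_some, List.length_erase_of_mem h]
  have := List.length_pos_of_mem h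
  omega

-- one iteration of the for-body: a = min(ls); remove all a (none = ValueError from min on empty ls)
def minfindStep (st : Option (List Int)) : Option (List Int) :=
  st.bind fun l => (PySem.List.min? l (fun x => x)).map fun a => removeLoop a l

def minfind (n : Int) (ls : List Int) : Int :=
  let final := (PySem.List.pyRange 0 (n - 1) 1).foldl (fun st _ => minfindStep st) (some ls)
  -- final min(ls); none = ValueError, excluded by Pre_minfind
  (final.bind fun l => PySem.List.min? l (fun x => x)).getD 0

-- ===== PORT B =====
def minfind_alt (n : Int) (ls : List Int) : Int :=
  let vals := PySem.List.sorted (PySem.Set.ofList ls) (fun x => x) false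
  -- vals[max(n-1, 0)]; none = IndexError, excluded by Pre_minfind
  (PySem.List.pyGet? vals (max (n - 1) 0)).getD 0

-- ===== PRECONDITION & SPEC =====
-- exactly where A returns: min() is reached n-1 (capped at 0) times on lists that are still
-- nonempty, i.e. ls has more than max(n-1,0) distinct values
def Pre_minfind (n : Int) (ls : List Int) : Prop :=
  max (n - 1) 0 < ((PySem.Set.ofList ls).length : Int)
instance (n : Int) (ls : List Int) : Decidable (Pre_minfind n ls) := by unfold Pre_minfind; infer_instance

def pvWitness_minfind : Int × List Int := (2, [3, 1, 2, 1])

def Spec_minfind (n : Int) (ls : List Int) (out : Int) : Prop := out = minfind_alt n ls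
instance (n : Int) (ls : List Int) (out : Int) : Decidable (Spec_minfind n ls out) := by unfold Spec_minfind; infer_instance

-- ===== CLAIM (what is proved, stated in full; the proofs are below) =====
def Claim_equal_minfind : Prop := ∀ (n : Int) (ls : List Int), Dom_minfind n ls → Pre_minfind n ls → Spec_minfind n ls (minfind n ls)

-- ===== LEMMAS AND PROOFS =====

-- sorted distinct values of l
def sortedSet (l : List Int) : List Int :=
  PySem.List.sorted (PySem.Set.ofList l) (fun x => x) false

lemma filter_erase (a : Int) (l : List Int) :
    (l.erase a).filter (fun x => x != a) = l.filter (fun x => x != a) := by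
  induction l with
  | nil => rfl
  | cons x xs ih =>
    by_cases hx : x = a
    · subst hx
      rw [List.erase_cons_head]
      rw [List.filter_cons_of_neg (by simp)]
    · rw [List.erase_cons_tail (by simp [hx])]
      rw [List.filter_cons_of_pos (by simp [hx]), List.filter_cons_of_pos (by simp [hx]), ih]

lemma removeLoop_eq_filter_aux (a : Int) :
    ∀ (N : Nat) (l : List Int), l.length ≤ N → removeLoop a l = l.filter (fun x => x != a) := by
  intro N
  induction N with
  | zero =>
    intro l hl
    have : l = [] := List.eq_nil_of_length_eq_zero (Nat.le_zero.mp hl)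
    subst this
    rw [removeLoop.eq_def]
    simp
  | succ N ih =>
    intro l hl
    rw [removeLoop.eq_def]
    by_cases h : a ∈ l
    · simp only [h, dite_true]
      rw [PySem.List.remove?_eq_some_erase l a h, Option.getD_some]
      rw [ih (l.erase a) (by rw [List.length_erase_of_mem h]; omega)]
      exact filter_erase a l
    · simp only [h, dite_false]
      symm
      apply List.filter_eq_self.mpr
      intro x hx
      simp only [bne_iff_ne, ne_eq]
      rintro rfl
      exact h hx

lemma removeLoop_eq_filter (a : Int) (l : List Int) :
    removeLoop a l = l.filter (fun x => x != a) :=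
  removeLoop_eq_filter_aux a l.length l (le_refl _)

lemma sortedSet_nil_iff (l : List Int) : sortedSet l = [] ↔ l = [] := by
  unfold sortedSet
  rw [PySem.List.sorted_eq_nil_iff]
  constructor
  · intro h
    cases l with
    | nil => rfl
    | cons x xs =>
      exfalso
      have : x ∈ PySem.Set.ofList (x :: xs) := (PySem.Set.mem_ofList _ _).mpr (by simp)
      simp [h] at this
  · rintro rfl; rfl

lemma min_eq_head {l : List Int} {m : Int} {t : List Int} (h : sortedSet l = m :: t) :
    PySem.List.min? l (fun x => x) = some m := by
  have hl : l ≠ [] := by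
    intro hnil
    rw [(sortedSet_nil_iff l).mpr hnil] at h
    simp at h
  obtain ⟨m', hm'⟩ : ∃ m', PySem.List.min? l (fun x => x) = some m' := by
    cases hmin : PySem.List.min? l (fun x => x) with
    | none => exact absurd ((PySem.List.min?_eq_none_iff _ _).mp hmin) hl
    | some v => exact ⟨v, rfl⟩
  have hmem : m' ∈ l := PySem.List.min?_mem hm'
  have hmin' : ∀ y ∈ l, m' ≤ y := fun y hy => PySem.List.min?_isMin hm' y hy
  have hm_mem : m ∈ l := by
    have hms : m ∈ sortedSet l := by rw [h]; exact List.mem_cons_self ..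
    unfold sortedSet at hms
    rw [PySem.List.mem_sorted] at hms
    exact (PySem.Set.mem_ofList _ _).mp hms
  have hle : ∀ y ∈ PySem.Set.ofList l, m ≤ y := by
    unfold sortedSet at h
    exact PySem.List.key_head_sorted_le (PySem.Set.ofList l) (fun x => x) h
  have h1 : m ≤ m' := hle m' ((PySem.Set.mem_ofList _ _).mpr hmem)
  have h2 : m' ≤ m := hmin' m hm_mem
  rw [hm', le_antisymm h1 h2]

lemma sortedSet_filter {l : List Int} {m : Int} {t : List Int} (h : sortedSet l = m :: t) :
    sortedSet (l.filter (fun x => x != m)) = t := by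
  have hpw : (m :: t).Pairwise (· < ·) := by
    have hp := PySem.List.sorted_ofList_pairwise_lt (xs := l)
    unfold sortedSet at h
    rwa [h] at hp
  have hperm : (m :: t).Perm (PySem.Set.ofList l) := by
    have hp := PySem.List.sorted_perm (PySem.Set.ofList l) (fun x => x) false
    unfold sortedSet at h
    rwa [h] at hp
  unfold sortedSet
  apply PySem.List.sorted_eq_of_perm_of_pairwise_lt
  · -- t.Perm (ofList (filter))
    have hnd_t : t.Nodup :=
      ((hpw.imp fun hab => ne_of_lt hab).sublist (List.sublist_cons_self m t))
    have hnd_f : (PySem.Set.ofList (l.filter (fun x => x != m))).Nodup :=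
      PySem.Set.nodup_ofList _
    rw [List.perm_ext_iff_of_nodup hnd_t hnd_f]
    intro x
    rw [PySem.Set.mem_ofList, List.mem_filter]
    constructor
    · intro hx
      have hxl : x ∈ l := by
        have : x ∈ PySem.Set.ofList l := hperm.mem_iff.mp (List.mem_cons_of_mem m hx)
        exact (PySem.Set.mem_ofList _ _).mp this
      refine ⟨hxl, ?_⟩
      have hmne : m ∉ t := fun hmt' => lt_irrefl m ((List.pairwise_cons.mp hpw).1 m hmt')
      simp only [bne_iff_ne, ne_eq]
      rintro rfl
      exact hmne hx
    · rintro ⟨hxl, hxm⟩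
      have hx' : x ∈ m :: t := hperm.mem_iff.mpr ((PySem.Set.mem_ofList _ _).mpr hxl)
      rcases List.mem_cons.mp hx' with rfl | hxt
      · simp at hxm
      · exact hxt
  · exact (List.pairwise_cons.mp hpw).2

lemma foldl_ignore_iterate (L : List Int) (s : Option (List Int)) :
    L.foldl (fun st _ => minfindStep st) s = minfindStep^[L.length] s := by
  induction L generalizing s with
  | nil => rfl
  | cons x xs ih =>
    simp only [List.foldl_cons, List.length_cons, ih, Function.iterate_succ_apply]

lemma iter_sortedSet : ∀ (k : Nat) (l : List Int), k ≤ (sortedSet l).length →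
    ∃ l', minfindStep^[k] (some l) = some l' ∧ sortedSet l' = (sortedSet l).drop k := by
  intro k
  induction k with
  | zero => intro l _; exact ⟨l, rfl, by simp⟩
  | succ k ih =>
    intro l hk
    obtain ⟨m, t, hmt⟩ : ∃ m t, sortedSet l = m :: t := by
      cases hS : sortedSet l with
      | nil => rw [hS] at hk; simp at hk
      | cons m t => exact ⟨m, t, rfl⟩
    have hstep : minfindStep (some l) = some (removeLoop m l) := by
      simp [minfindStep, min_eq_head hmt]
    have hfilter : sortedSet (removeLoop m l) = t := by
      rw [removeLoop_eq_filter]; exact sortedSet_filter hmt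
    have hk' : k ≤ (sortedSet (removeLoop m l)).length := by
      rw [hfilter]
      rw [hmt] at hk
      simpa using Nat.le_of_succ_le_succ hk
    obtain ⟨l', hl', hS'⟩ := ih (removeLoop m l) hk'
    refine ⟨l', ?_, ?_⟩
    · rw [Function.iterate_succ_apply, hstep, hl']
    · rw [hS', hfilter, hmt, List.drop_succ_cons]

-- ===== VERDICT (by name: the statement is the Claim_ definition above) =====
theorem minfind_spec : Claim_equal_minfind := by
  intro n ls _ hpre
  unfold Pre_minfind at hpre
  unfold Spec_minfind minfind minfind_alt
  have hklen : (PySem.List.pyRange 0 (n - 1) 1).length = (max (n - 1) 0).toNat := by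
    rw [PySem.List.length_pyRange_one]; omega
  have hlen : (max (n - 1) 0).toNat < (sortedSet ls).length := by
    unfold sortedSet
    rw [PySem.List.length_sorted]
    omega
  obtain ⟨l', hl', hS'⟩ := iter_sortedSet ((max (n - 1) 0).toNat) ls (Nat.le_of_lt hlen)
  have hdrop : (sortedSet ls).drop ((max (n - 1) 0).toNat) =
      (sortedSet ls)[(max (n - 1) 0).toNat] :: (sortedSet ls).drop ((max (n - 1) 0).toNat + 1) :=
    (List.getElem_cons_drop hlen).symm
  have hmin : PySem.List.min? l' (fun x => x) =
      some ((sortedSet ls)[(max (n - 1) 0).toNat]'hlen) :=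
    min_eq_head (by rw [hS']; exact hdrop)
  have h0 : (0 : Int) ≤ max (n - 1) 0 := le_max_right _ _
  have hlt : max (n - 1) 0 <
      ((PySem.List.sorted (PySem.Set.ofList ls) (fun x => x) false).length : Int) := by
    rw [PySem.List.length_sorted]; omega
  have hget : PySem.List.pyGet? (PySem.List.sorted (PySem.Set.ofList ls) (fun x => x) false)
      (max (n - 1) 0) = some ((sortedSet ls)[(max (n - 1) 0).toNat]'hlen) := by
    rw [PySem.List.pyGet?_eq_some_getElem _ h0 hlt]
    rfl
  simp only [foldl_ignore_iterate, hklen, hl', Option.bind_some, hmin, Option.getD_some, hget]
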